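-- pv_equiv track=rewrite | github.com/Richard-GOZAN/TP_Indexation_Web | TP3/search_engine.py | check_exact_match
-- ===== SOURCE A (Python) =====
-- from typing import Dict, List, Tuple, Set, Any
--
-- def check_exact_match(query_tokens: List[str],
--                      url: str,
--                      title_index: Dict,
--                      description_index: Dict) -> Tuple[bool, bool]:
--     """
--     Check if query appears as exact phrase in title or description
--
--     Args:
--         query_tokens: List of query tokens (in order)
--         url: Document URL
--         title_index: Title inverted index
--         description_index: Description inverted index
--
--     Returns:
--         Tuple of (title_exact_match, description_exact_match)
--     """
--     if not query_tokens:
--         return False, False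
--
--     title_match = False
--     description_match = False
--
--     # Check title
--     if len(query_tokens) == 1:
--         title_match = query_tokens[0] in title_index and url in title_index[query_tokens[0]]
--     else:
--         # Check consecutive positions
--         first_token = query_tokens[0]
--         if first_token in title_index and url in title_index[first_token]:
--             positions = title_index[first_token][url]
--             for start_pos in positions:
--                 match = True
--                 for i, token in enumerate(query_tokens[1:], 1):
--                     if token not in title_index or url not in title_index[token]:
--                         match = False
--                         break
--                     if (start_pos + i) not in title_index[token][url]:
--                         match = False
--                         break
--                 if match:
--                     title_match = True
--                     break
--
--     # Check description (similar logic)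
--     if len(query_tokens) == 1:
--         description_match = query_tokens[0] in description_index and url in description_index[query_tokens[0]]
--     else:
--         first_token = query_tokens[0]
--         if first_token in description_index and url in description_index[first_token]:
--             positions = description_index[first_token][url]
--             for start_pos in positions:
--                 match = True
--                 for i, token in enumerate(query_tokens[1:], 1):
--                     if token not in description_index or url not in description_index[token]:
--                         match = False
--                         break
--                     if (start_pos + i) not in description_index[token][url]:
--                         match = False
--                         break
--                 if match:
--                     description_match = True
--                     break
--
--     return title_match, description_match
-- ===== SOURCE B (Python) =====
-- from typing import Dict, List, Tuple
--
-- def _phrase_match(query_tokens: List[str], url: str, index: Dict) -> bool: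
--     # Gather the position list of every token for this url; any miss means no phrase.
--     pos_lists = []
--     for tok in query_tokens:
--         docs = index.get(tok)
--         if docs is None or url not in docs:
--             return False
--         pos_lists.append(docs[url])
--     if len(pos_lists) == 1:
--         return True
--     # Shifted filtering: keep only the start positions consistent with every later token.
--     starts = pos_lists[0]
--     for i, plist in enumerate(pos_lists[1:], 1):
--         s = set(plist)
--         starts = [p for p in starts if p + i in s]
--     return bool(starts)
--
-- def check_exact_match(query_tokens: List[str],
--                       url: str,
--                       title_index: Dict,
--                       description_index: Dict) -> Tuple[bool, bool]:
--     if not query_tokens: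
--         return False, False
--     return (_phrase_match(query_tokens, url, title_index),
--             _phrase_match(query_tokens, url, description_index))
-- ===== Notes on version B (the rewrite author's own statement) =====
-- stated objective: alternative
-- what changed: B collects each token's position list once up front, then narrows the candidate start positions by shifted filtering against per-token hash sets, instead of A's per-start-position rescan with linear list membership.
import Mathlib
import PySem

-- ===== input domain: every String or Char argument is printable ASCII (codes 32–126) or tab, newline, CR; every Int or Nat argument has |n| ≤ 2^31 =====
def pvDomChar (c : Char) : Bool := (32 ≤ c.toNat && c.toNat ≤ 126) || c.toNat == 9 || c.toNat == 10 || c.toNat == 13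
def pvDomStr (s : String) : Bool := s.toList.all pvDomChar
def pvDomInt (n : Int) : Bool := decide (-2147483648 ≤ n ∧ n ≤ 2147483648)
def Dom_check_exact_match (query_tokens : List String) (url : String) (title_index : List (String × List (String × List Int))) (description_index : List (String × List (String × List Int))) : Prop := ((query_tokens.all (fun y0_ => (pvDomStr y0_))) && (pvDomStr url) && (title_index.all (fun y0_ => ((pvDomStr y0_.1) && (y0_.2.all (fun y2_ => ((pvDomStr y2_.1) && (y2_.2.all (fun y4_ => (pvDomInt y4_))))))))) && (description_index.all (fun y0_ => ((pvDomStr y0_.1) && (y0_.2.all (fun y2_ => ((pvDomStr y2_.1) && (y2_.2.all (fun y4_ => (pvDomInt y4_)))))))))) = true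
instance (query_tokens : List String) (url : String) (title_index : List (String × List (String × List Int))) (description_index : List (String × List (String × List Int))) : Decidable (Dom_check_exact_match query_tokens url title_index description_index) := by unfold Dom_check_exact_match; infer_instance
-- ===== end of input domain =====

-- B replaces A's per-start-position rescan (list membership) by collecting each token's
-- position list once and narrowing the start positions by shifted filtering against sets (objective: alternative).

-- ===== PORT A =====
-- inner loop "for i, token in enumerate(query_tokens[1:], 1): …" starting at index i
def pvAMatchAt (index : List (String × List (String × List Int))) (url : String) (start_pos : Int) : Int → List String → Bool
  | _, [] => true
  | i, tok :: rest =>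
    match (PySem.Dict.mk index).get? tok with
    | none => false
    | some docs =>
      match (PySem.Dict.mk docs).get? url with
      | none => false
      | some poss =>
        if poss.contains (start_pos + i) then pvAMatchAt index url start_pos (i + 1) rest
        else false

-- outer loop "for start_pos in positions: … if match: … break"
def pvAScan (index : List (String × List (String × List Int))) (url : String) (rest : List String) : List Int → Bool
  | [] => false
  | p :: ps => if pvAMatchAt index url p 1 rest then true else pvAScan index url rest ps

-- the duplicated title/description block of A, once
def pvACheckField (query_tokens : List String) (url : String) (index : List (String × List (String × List Int))) : Bool :=
  match query_tokens with
  | [] => false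
  | [t] =>
    match (PySem.Dict.mk index).get? t with
    | none => false
    | some docs => ((PySem.Dict.mk docs).get? url).isSome
  | t :: rest =>
    match (PySem.Dict.mk index).get? t with
    | none => false
    | some docs =>
      match (PySem.Dict.mk docs).get? url with
      | none => false
      | some positions => pvAScan index url rest positions

def check_exact_match (query_tokens : List String) (url : String) (title_index : List (String × List (String × List Int))) (description_index : List (String × List (String × List Int))) : Bool × Bool :=
  if query_tokens.isEmpty then (false, false)
  else (pvACheckField query_tokens url title_index, pvACheckField query_tokens url description_index)

-- ===== PORT B =====
-- the collection loop of _phrase_match: position list of every token, None on any miss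
def pvBPosLists (index : List (String × List (String × List Int))) (url : String) : List String → Option (List (List Int))
  | [] => some []
  | tok :: rest =>
    match (PySem.Dict.mk index).get? tok with
    | none => none
    | some docs =>
      match (PySem.Dict.mk docs).get? url with
      | none => none
      | some ps =>
        match pvBPosLists index url rest with
        | none => none
        | some ls => some (ps :: ls)

-- the shifted-filtering loop of _phrase_match
def pvBShiftFilter (starts : List Int) (i : Int) : List (List Int) → List Int
  | [] => starts
  | plist :: rest =>
    let s : PySem.Set Int := PySem.Set.ofList plist
    pvBShiftFilter (starts.filter (fun p => PySem.Set.contains s (p + i))) (i + 1) rest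

def pvBPhraseMatch (query_tokens : List String) (url : String) (index : List (String × List (String × List Int))) : Bool :=
  match pvBPosLists index url query_tokens with
  | none => false
  | some pos_lists =>
    match pos_lists with
    | [] => false        -- unreachable: query_tokens is nonempty here
    | [_] => true
    | p0 :: rest => !(pvBShiftFilter p0 1 rest).isEmpty

def check_exact_match_alt (query_tokens : List String) (url : String) (title_index : List (String × List (String × List Int))) (description_index : List (String × List (String × List Int))) : Bool × Bool :=
  if query_tokens.isEmpty then (false, false)
  else (pvBPhraseMatch query_tokens url title_index, pvBPhraseMatch query_tokens url description_index)

-- ===== PRECONDITION & SPEC =====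
def Spec_check_exact_match (query_tokens : List String) (url : String) (title_index : List (String × List (String × List Int))) (description_index : List (String × List (String × List Int))) (out : Bool × Bool) : Prop := out = check_exact_match_alt query_tokens url title_index description_index
instance (query_tokens : List String) (url : String) (title_index : List (String × List (String × List Int))) (description_index : List (String × List (String × List Int))) (out : Bool × Bool) : Decidable (Spec_check_exact_match query_tokens url title_index description_index out) := by unfold Spec_check_exact_match; infer_instance

-- ===== CLAIM (what is proved, stated in full; the proofs are below) =====
def Claim_equal_check_exact_match : Prop := ∀ (query_tokens : List String) (url : String) (title_index : List (String × List (String × List Int))) (description_index : List (String × List (String × List Int))), Dom_check_exact_match query_tokens url title_index description_index → Spec_check_exact_match query_tokens url title_index description_index (check_exact_match query_tokens url title_index description_index)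

-- ===== LEMMAS AND PROOFS =====

-- "start p, offset i, every later list contains p + i + j"
def pvAllMem (p : Int) : Int → List (List Int) → Bool
  | _, [] => true
  | i, l :: ls => l.contains (p + i) && pvAllMem p (i + 1) ls

theorem pvBPosLists_length (index : List (String × List (String × List Int))) (url : String)
    (qs : List String) (ls : List (List Int)) (h : pvBPosLists index url qs = some ls) :
    ls.length = qs.length := by
  induction qs generalizing ls with
  | nil => simp [pvBPosLists] at h; subst h; rfl
  | cons tok rest ih =>
    simp only [pvBPosLists] at h
    cases h1 : (PySem.Dict.mk index).get? tok with
    | none => simp [h1] at h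
    | some docs =>
      simp only [h1] at h
      cases h2 : (PySem.Dict.mk docs).get? url with
      | none => simp [h2] at h
      | some ps =>
        simp only [h2] at h
        cases h3 : pvBPosLists index url rest with
        | none => simp [h3] at h
        | some ls' =>
          simp only [h3, Option.some.injEq] at h
          subst h
          simp [ih ls' h3]

theorem pvAMatchAt_of_some (index : List (String × List (String × List Int))) (url : String)
    (rest : List String) (ls : List (List Int)) (h : pvBPosLists index url rest = some ls)
    (p i : Int) : pvAMatchAt index url p i rest = pvAllMem p i ls := by
  induction rest generalizing ls i with
  | nil => simp [pvBPosLists] at h; subst h; rfl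
  | cons tok rest ih =>
    simp only [pvBPosLists] at h
    cases h1 : (PySem.Dict.mk index).get? tok with
    | none => simp [h1] at h
    | some docs =>
      simp only [h1] at h
      cases h2 : (PySem.Dict.mk docs).get? url with
      | none => simp [h2] at h
      | some ps =>
        simp only [h2] at h
        cases h3 : pvBPosLists index url rest with
        | none => simp [h3] at h
        | some ls' =>
          simp only [h3, Option.some.injEq] at h
          subst h
          simp only [pvAMatchAt, h1, h2, pvAllMem]
          rw [ih ls' h3]
          cases ps.contains (p + i) <;> simp

theorem pvAMatchAt_of_none (index : List (String × List (String × List Int))) (url : String)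
    (rest : List String) (h : pvBPosLists index url rest = none)
    (p i : Int) : pvAMatchAt index url p i rest = false := by
  induction rest generalizing i with
  | nil => simp [pvBPosLists] at h
  | cons tok rest ih =>
    simp only [pvBPosLists] at h
    cases h1 : (PySem.Dict.mk index).get? tok with
    | none => simp [pvAMatchAt, h1]
    | some docs =>
      simp only [h1] at h
      cases h2 : (PySem.Dict.mk docs).get? url with
      | none => simp [pvAMatchAt, h1, h2]
      | some ps =>
        simp only [h2] at h
        cases h3 : pvBPosLists index url rest with
        | none =>
          simp only [pvAMatchAt, h1, h2]
          split <;> simp [ih h3]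
        | some ls' => simp [h3] at h

theorem pvAScan_eq_any (index : List (String × List (String × List Int))) (url : String)
    (rest : List String) (poss : List Int) :
    pvAScan index url rest poss = poss.any (fun p => pvAMatchAt index url p 1 rest) := by
  induction poss with
  | nil => rfl
  | cons p ps ih =>
    simp only [pvAScan, List.any_cons, ← ih]
    split <;> simp_all

theorem pvSetContains_ofList (l : List Int) (x : Int) :
    (PySem.Set.ofList l).contains x = l.contains x := by
  rw [Bool.eq_iff_iff]
  constructor
  · intro hx
    have : x ∈ PySem.Set.ofList l := by
      simpa [List.contains_iff_mem] using hx
    simpa [List.contains_iff_mem] using (PySem.Set.mem_ofList l x).mp this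
  · intro hx
    have : x ∈ PySem.Set.ofList l :=
      (PySem.Set.mem_ofList l x).mpr (by simpa [List.contains_iff_mem] using hx)
    simpa [List.contains_iff_mem] using this

theorem pvBShiftFilter_eq_filter (ls : List (List Int)) (starts : List Int) (i : Int) :
    pvBShiftFilter starts i ls = starts.filter (fun p => pvAllMem p i ls) := by
  induction ls generalizing starts i with
  | nil => simp [pvBShiftFilter, pvAllMem]
  | cons l ls ih =>
    simp only [pvBShiftFilter, ih, List.filter_filter, pvAllMem]
    congr 1
    funext p
    rw [pvSetContains_ofList]
    exact Bool.and_comm _ _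

theorem pvNotEmpty_filter_eq_any (xs : List Int) (f : Int → Bool) :
    (!(xs.filter f).isEmpty) = xs.any f := by
  induction xs with
  | nil => rfl
  | cons x xs ih => cases h : f x <;> simp [h, ← ih]

theorem pvField_eq (query_tokens : List String) (url : String)
    (index : List (String × List (String × List Int))) (hne : query_tokens ≠ []) :
    pvACheckField query_tokens url index = pvBPhraseMatch query_tokens url index := by
  match query_tokens with
  | [] => exact absurd rfl hne
  | [t] =>
    cases h1 : (PySem.Dict.mk index).get? t with
    | none =>
      have hB : pvBPosLists index url [t] = none := by
        conv_lhs => rw [pvBPosLists]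
        simp only [h1]
      simp [pvACheckField, pvBPhraseMatch, hB, h1]
    | some docs =>
      cases h2 : (PySem.Dict.mk docs).get? url with
      | none =>
        have hB : pvBPosLists index url [t] = none := by
          conv_lhs => rw [pvBPosLists]
          simp only [h1, h2]
        simp [pvACheckField, pvBPhraseMatch, hB, h1, h2]
      | some ps =>
        have hB : pvBPosLists index url [t] = some [ps] := by
          conv_lhs => rw [pvBPosLists]
          simp only [h1, h2, pvBPosLists]
        simp [pvACheckField, pvBPhraseMatch, hB, h1, h2]
  | t :: r :: rs =>
    cases h1 : (PySem.Dict.mk index).get? t with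
    | none =>
      have hB : pvBPosLists index url (t :: r :: rs) = none := by
        conv_lhs => rw [pvBPosLists]
        simp only [h1]
      simp [pvACheckField, pvBPhraseMatch, hB, h1]
    | some docs =>
      cases h2 : (PySem.Dict.mk docs).get? url with
      | none =>
        have hB : pvBPosLists index url (t :: r :: rs) = none := by
          conv_lhs => rw [pvBPosLists]
          simp only [h1, h2]
        simp [pvACheckField, pvBPhraseMatch, hB, h1, h2]
      | some poss =>
        cases h3 : pvBPosLists index url (r :: rs) with
        | none =>
          have hB : pvBPosLists index url (t :: r :: rs) = none := by
            conv_lhs => rw [pvBPosLists]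
            simp only [h1, h2, h3]
          simp only [pvACheckField, pvBPhraseMatch, hB, h1, h2, pvAScan_eq_any,
            List.any_eq_false]
          exact fun p _ => by simp [pvAMatchAt_of_none index url (r :: rs) h3 p 1]
        | some ls =>
          have hB : pvBPosLists index url (t :: r :: rs) = some (poss :: ls) := by
            conv_lhs => rw [pvBPosLists]
            simp only [h1, h2, h3]
          have hlen := pvBPosLists_length index url (r :: rs) ls h3
          cases ls with
          | nil => simp at hlen
          | cons l0 ls' =>
            simp only [pvACheckField, pvBPhraseMatch, hB, h1, h2, pvAScan_eq_any,
              pvBShiftFilter_eq_filter, pvNotEmpty_filter_eq_any]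
            congr 1
            funext p
            exact pvAMatchAt_of_some index url (r :: rs) (l0 :: ls') h3 p 1

-- ===== VERDICT (by name: the statement is the Claim_ definition above) =====
theorem check_exact_match_spec : Claim_equal_check_exact_match := by
  intro qts url ti di _
  unfold Spec_check_exact_match check_exact_match check_exact_match_alt
  cases h : qts.isEmpty
  · have hne : qts ≠ [] := by simpa [List.isEmpty_iff] using h
    simp [pvField_eq qts url ti hne, pvField_eq qts url di hne]
  · simp
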